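-- pv_equiv track=rewrite | github.com/AndryeyevIvan/NoteAnalizeInfomatrix | NeuroTests/Pages/PagesTest.py | smooth_preds
-- ===== SOURCE A (Python) =====
-- def smooth_preds(preds, max_gap=2):
--     smoothed = preds.copy()
--     gap_count = 0
--     for i in range(len(preds)):
--         if preds[i] == 0:
--             gap_count += 1
--         else:
--             if 0 < gap_count <= max_gap:
--                 smoothed[i-gap_count:i] = [1]*gap_count
--             gap_count = 0
--     return smoothed
-- ===== SOURCE B (Python) =====
-- def smooth_preds(preds, max_gap=2):
--     idxs = [i for i in range(len(preds)) if preds[i] != 0]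
--     smoothed = preds.copy()
--     prev = -1
--     for cur in idxs:
--         gap = cur - prev - 1
--         if 0 < gap <= max_gap:
--             smoothed[prev+1:cur] = [1]*gap
--         prev = cur
--     return smoothed
-- ===== Notes on version B (the rewrite author's own statement) =====
-- stated objective: alternative
-- what changed: B first collects all non-zero indices in one pass, then fills each small zero-gap between consecutive non-zero indices from a prev pointer, instead of A's single pass carrying a running zero counter.
import Mathlib
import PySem

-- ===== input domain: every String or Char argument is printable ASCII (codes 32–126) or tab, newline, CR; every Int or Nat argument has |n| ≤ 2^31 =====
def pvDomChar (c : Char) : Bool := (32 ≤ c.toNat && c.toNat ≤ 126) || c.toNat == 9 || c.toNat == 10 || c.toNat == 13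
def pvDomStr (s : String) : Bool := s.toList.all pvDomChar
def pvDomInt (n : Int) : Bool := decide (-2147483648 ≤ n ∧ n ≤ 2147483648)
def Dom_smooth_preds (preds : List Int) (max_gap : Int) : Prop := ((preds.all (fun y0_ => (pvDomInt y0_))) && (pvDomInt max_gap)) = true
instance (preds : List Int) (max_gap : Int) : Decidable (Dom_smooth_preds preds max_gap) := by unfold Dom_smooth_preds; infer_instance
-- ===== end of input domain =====

-- B is an alternative decomposition: collect the non-zero indices first, then fill
-- each short zero-gap between consecutive non-zero indices (same values, O(n) both).

-- ===== PORT A =====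
-- one loop iteration of A: preds[i]==0 bumps the counter, otherwise a short gap
-- just before i is overwritten with ones (slice assignment, here exact because
-- 0 ≤ i - gap_count ≤ i ≤ len) and the counter resets.
def smoothAStep (preds : List Int) (max_gap : Int) (st : List Int × Int) (i : Nat) : List Int × Int :=
  if preds.getD i 0 = 0 then (st.1, st.2 + 1)
  else if 0 < st.2 ∧ st.2 ≤ max_gap then
    (st.1.take ((i : Int) - st.2).toNat ++ List.replicate st.2.toNat 1 ++ st.1.drop i, 0)
  else (st.1, 0)

-- range(len(preds)) always yields in-range indices, so preds.getD i 0 is exact.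
def smooth_preds (preds : List Int) (max_gap : Int) : List Int :=
  ((List.range preds.length).foldl (smoothAStep preds max_gap) (preds, 0)).1

-- ===== PORT B =====
-- one iteration of B's loop over the collected non-zero indices: fill the zero-gap
-- (prev, cur) with ones when it is short; slice bounds are exact since -1 ≤ prev < cur.
def smoothBStep (max_gap : Int) (st : List Int × Int) (cur : Nat) : List Int × Int :=
  let gap : Int := (cur : Int) - st.2 - 1
  if 0 < gap ∧ gap ≤ max_gap then
    (st.1.take (st.2 + 1).toNat ++ List.replicate gap.toNat 1 ++ st.1.drop cur, (cur : Int))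
  else (st.1, (cur : Int))

def smooth_preds_alt (preds : List Int) (max_gap : Int) : List Int :=
  let idxs := (List.range preds.length).filter (fun i => preds.getD i 0 ≠ 0)
  (idxs.foldl (smoothBStep max_gap) (preds, -1)).1

-- ===== PRECONDITION & SPEC =====
def Spec_smooth_preds (preds : List Int) (max_gap : Int) (out : List Int) : Prop := out = smooth_preds_alt preds max_gap
instance (preds : List Int) (max_gap : Int) (out : List Int) : Decidable (Spec_smooth_preds preds max_gap out) := by unfold Spec_smooth_preds; infer_instance

-- ===== CLAIM (what is proved, stated in full; the proofs are below) =====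
def Claim_equal_smooth_preds : Prop := ∀ (preds : List Int) (max_gap : Int), Dom_smooth_preds preds max_gap → Spec_smooth_preds preds max_gap (smooth_preds preds max_gap)

-- ===== LEMMAS AND PROOFS =====

-- Invariant bridging the two folds: while A scans a consecutive block of indices
-- starting at i0 with counter g, B has processed exactly the non-zero indices below
-- i0 with prev pointer prev, the smoothed lists agree, and i0 = prev + 1 + g.
theorem smooth_bridge (preds : List Int) (m : Int) :
    ∀ (k i0 : Nat) (s : List Int) (prev g : Int),
      -1 ≤ prev → 0 ≤ g → (i0 : Int) = prev + 1 + g →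
      ((List.range' i0 k).foldl (smoothAStep preds m) (s, g)).1
        = (((List.range' i0 k).filter (fun i => preds.getD i 0 ≠ 0)).foldl
            (smoothBStep m) (s, prev)).1 := by
  intro k
  induction k with
  | zero => intro i0 s prev g _ _ _; simp
  | succ k ih =>
    intro i0 s prev g hprev hg hinv
    rw [List.range'_succ]
    by_cases hz : preds.getD i0 0 = 0
    · -- zero at i0: A bumps the counter, B skips the index
      simp only [List.foldl_cons, List.filter_cons, smoothAStep, hz, ne_eq,
        not_true_eq_false, decide_false, Bool.false_eq_true, if_false, if_true]
      exact ih (i0 + 1) s prev (g + 1) hprev (by omega) (by push_cast; omega)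
    · -- non-zero at i0: both may fill the same gap, then align at prev = i0, g = 0
      have hgap : (i0 : Int) - prev - 1 = g := by omega
      simp only [List.foldl_cons, List.filter_cons, smoothAStep, smoothBStep,
        ne_eq, hz, not_false_eq_true, decide_true, if_false, if_true, if_true]
      rw [hgap]
      by_cases hc : 0 < g ∧ g ≤ m
      · rw [if_pos hc, if_pos hc]
        have htk : ((i0 : Int) - g).toNat = (prev + 1).toNat := by omega
        rw [htk]
        exact ih (i0 + 1) _ (i0 : Int) 0 (by omega) le_rfl (by push_cast; omega)
      · rw [if_neg hc, if_neg hc]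
        exact ih (i0 + 1) s (i0 : Int) 0 (by omega) le_rfl (by push_cast; omega)

-- ===== VERDICT (by name: the statement is the Claim_ definition above) =====
theorem smooth_preds_spec : Claim_equal_smooth_preds := by
  intro preds max_gap _
  unfold Spec_smooth_preds smooth_preds smooth_preds_alt
  rw [List.range_eq_range']
  exact smooth_bridge preds max_gap preds.length 0 preds (-1) 0 (by omega) le_rfl (by omega)
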